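-- pv_equiv track=rewrite | github.com/aabhinnav1999/aabhinnav_python_repository | ibm/question2.py | minReassignments
-- ===== SOURCE A (Python) =====
-- from typing import List
--
-- class DSU:
--     def __init__(self, n):
--         self.p = list(range(n))
--         self.r = [0]*n
--     def find(self, x):
--         while self.p[x] != x:
--             self.p[x] = self.p[self.p[x]]
--             x = self.p[x]
--         return x
--     def union(self, a, b):
--         ra, rb = self.find(a), self.find(b)
--         if ra == rb:
--             return False
--         if self.r[ra] < self.r[rb]:
--             ra, rb = rb, ra
--         self.p[rb] = ra
--         if self.r[ra] == self.r[rb]: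
--             self.r[ra] += 1
--         return True
--
-- def minReassignments(link_nodes: int, link_from: List[int], link_to: List[int]) -> int:
--     m = len(link_from)
--     if m < link_nodes - 1:
--         return -1
--
--     dsu = DSU(link_nodes)
--     for u, v in zip(link_from, link_to):
--         dsu.union(u-1, v-1)
--
--     comps = len({dsu.find(i) for i in range(link_nodes)})
--     return comps - 1
-- ===== SOURCE B (Python) =====
-- from typing import List
--
-- def minReassignments(link_nodes: int, link_from: List[int], link_to: List[int]) -> int:
--     m = len(link_from)
--     if m < link_nodes - 1:
--         return -1
--     lab = list(range(link_nodes))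
--     for u, v in zip(link_from, link_to):
--         a, b = lab[u - 1], lab[v - 1]
--         if a != b:
--             lab = [a if x == b else x for x in lab]
--     return len(set(lab)) - 1
-- ===== Notes on version B (the rewrite author's own statement) =====
-- stated objective: simpler
-- what changed: Replaces the DSU class (union-find with path halving and union by rank) by a plain label list: each edge merges the two endpoint labels by rewriting every occurrence of one label to the other, and the answer is the number of distinct labels minus 1.
import Mathlib
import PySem

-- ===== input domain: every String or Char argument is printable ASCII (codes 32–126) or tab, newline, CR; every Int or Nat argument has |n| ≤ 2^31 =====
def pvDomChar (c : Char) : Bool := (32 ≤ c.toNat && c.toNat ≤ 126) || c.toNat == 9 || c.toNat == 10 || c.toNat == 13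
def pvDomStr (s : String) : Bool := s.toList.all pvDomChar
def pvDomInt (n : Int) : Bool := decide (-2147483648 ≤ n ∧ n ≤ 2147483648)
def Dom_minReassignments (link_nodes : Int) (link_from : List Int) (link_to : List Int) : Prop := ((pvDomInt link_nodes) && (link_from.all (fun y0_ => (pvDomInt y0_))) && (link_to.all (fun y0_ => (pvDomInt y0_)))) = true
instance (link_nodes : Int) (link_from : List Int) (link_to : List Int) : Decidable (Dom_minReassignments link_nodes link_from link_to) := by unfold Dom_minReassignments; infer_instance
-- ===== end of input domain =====

-- B replaces the union-find (DSU with path halving and ranks) by naive label merging over a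
-- plain list, a structurally different algorithm of the same exact behaviour (objective: simpler).


-- ===== PORT A =====
-- DSU.find: Python's `while self.p[x] != x: self.p[x] = self.p[self.p[x]]; x = self.p[x]`.
-- The fuel argument is a totality guard only (p.length + 1 provably suffices under Pre_);
-- the body is the literal loop body, indexing via pyGetD/pySetD (Python negative-index exact).
def findA (fuel : Nat) (p : List Int) (x : Int) : List Int × Int :=
  match fuel with
  | 0 => (p, x)
  | fuel + 1 =>
    let px := PySem.List.pyGetD p x 0
    if px = x then (p, x)
    else
      let ppx := PySem.List.pyGetD p px 0
      findA fuel (PySem.List.pySetD p x ppx) ppx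

-- DSU.union (returns the mutated (p, r) state; the Python bool result is never used by A)
def unionA (p r : List Int) (a b : Int) : List Int × List Int :=
  let fa := findA (p.length + 1) p a
  let fb := findA (fa.1.length + 1) fa.1 b
  let ra := fa.2
  let rb := fb.2
  let p2 := fb.1
  if ra = rb then (p2, r)
  else
    let s := if PySem.List.pyGetD r ra 0 < PySem.List.pyGetD r rb 0 then (rb, ra) else (ra, rb)
    let p3 := PySem.List.pySetD p2 s.2 s.1
    let r' := if PySem.List.pyGetD r s.1 0 = PySem.List.pyGetD r s.2 0
              then PySem.List.pySetD r s.1 (PySem.List.pyGetD r s.1 0 + 1) else r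
    (p3, r')

def minReassignments (link_nodes : Int) (link_from : List Int) (link_to : List Int) : Int :=
  let m : Int := link_from.length
  if m < link_nodes - 1 then -1
  else
    let st := (link_from.zip link_to).foldl
      (fun st uv => unionA st.1 st.2 (uv.1 - 1) (uv.2 - 1))
      (PySem.List.pyRange 0 link_nodes 1, List.replicate link_nodes.toNat (0 : Int))
    let fin := (PySem.List.pyRange 0 link_nodes 1).foldl
      (fun (acc : List Int × PySem.Set Int) i =>
        let t := findA (acc.1.length + 1) acc.1 i
        (t.1, PySem.Set.add acc.2 t.2))
      (st.1, PySem.Set.empty)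
    PySem.Set.len fin.2 - 1

-- ===== PORT B =====
def minReassignments_alt (link_nodes : Int) (link_from : List Int) (link_to : List Int) : Int :=
  let m : Int := link_from.length
  if m < link_nodes - 1 then -1
  else
    let lab := (link_from.zip link_to).foldl
      (fun lab uv =>
        let a := PySem.List.pyGetD lab (uv.1 - 1) 0
        let b := PySem.List.pyGetD lab (uv.2 - 1) 0
        if a ≠ b then lab.map (fun x => if x = b then a else x) else lab)
      (PySem.List.pyRange 0 link_nodes 1)
    PySem.Set.len (PySem.Set.ofList lab) - 1

-- ===== PRECONDITION & SPEC =====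
-- Pre_ excludes exactly the inputs on which Python A raises IndexError: some zipped edge
-- endpoint u with u-1 outside [-link_nodes, link_nodes), reached because the early -1
-- guard did not fire.  Wherever A returns, Pre_ holds.
def Pre_minReassignments (link_nodes : Int) (link_from : List Int) (link_to : List Int) : Prop :=
  (link_from.length : Int) < link_nodes - 1 ∨
  ∀ uv ∈ link_from.zip link_to,
    PySem.Raise.InRange link_nodes.toNat (uv.1 - 1) ∧ PySem.Raise.InRange link_nodes.toNat (uv.2 - 1)
instance (link_nodes : Int) (link_from : List Int) (link_to : List Int) : Decidable (Pre_minReassignments link_nodes link_from link_to) := by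
  unfold Pre_minReassignments PySem.Raise.InRange; infer_instance

def pvWitness_minReassignments : Int × List Int × List Int := (3, [1, 2], [2, 3])

def Spec_minReassignments (link_nodes : Int) (link_from : List Int) (link_to : List Int) (out : Int) : Prop := out = minReassignments_alt link_nodes link_from link_to
instance (link_nodes : Int) (link_from : List Int) (link_to : List Int) (out : Int) : Decidable (Spec_minReassignments link_nodes link_from link_to out) := by unfold Spec_minReassignments; infer_instance

-- ===== CLAIM (what is proved, stated in full; the proofs are below) =====
def Claim_equal_minReassignments : Prop := ∀ (link_nodes : Int) (link_from : List Int) (link_to : List Int), Dom_minReassignments link_nodes link_from link_to → Pre_minReassignments link_nodes link_from link_to → Spec_minReassignments link_nodes link_from link_to (minReassignments link_nodes link_from link_to)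

-- ===== LEMMAS AND PROOFS =====

-- parent function, root and the forest invariant of A's DSU state (proof-side only)
def parF (p : List Int) (i : Nat) : Nat := (p.getD i 0).toNat
def RootP (p : List Int) (i : Nat) : Nat := (parF p)^[p.length] i
def ValidP (p : List Int) : Prop := ∀ i, i < p.length → 0 ≤ p.getD i 0 ∧ p.getD i 0 < (p.length : Int)
def MeasP (p : List Int) (d : Nat → Nat) : Prop := ∀ i, i < p.length → parF p i ≠ i → d (parF p i) < d i
-- Python's wrap of a possibly negative in-range index
def normN (n : Nat) (x : Int) : Nat := if x < 0 then (x + n).toNat else x.toNat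
-- the label/root bisimulation between A's DSU state and B's label list
def RelP (p lab : List Int) (n : Nat) : Prop :=
  ∀ i j, i < n → j < n → (RootP p i = RootP p j ↔ lab.getD i 0 = lab.getD j 0)

theorem parF_lt {p : List Int} (hv : ValidP p) {i : Nat} (hi : i < p.length) : parF p i < p.length := by
  have := hv i hi; unfold parF; omega

theorem iter_lt {p : List Int} (hv : ValidP p) {i : Nat} (hi : i < p.length) (k : Nat) :
    (parF p)^[k] i < p.length := by
  induction k with
  | zero => simpa using hi
  | succ k ih => rw [Function.iterate_succ_apply']; exact parF_lt hv ih

theorem ex_fix {p : List Int} {d : Nat → Nat} (hv : ValidP p) (hd : MeasP p d) :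
    ∀ i, i < p.length → ∃ k, parF p ((parF p)^[k] i) = (parF p)^[k] i := by
  have H : ∀ m i, i < p.length → d i = m →
      ∃ k, parF p ((parF p)^[k] i) = (parF p)^[k] i := by
    intro m
    induction m using Nat.strong_induction_on with
    | _ m ih =>
      intro i hi hdi
      by_cases hfix : parF p i = i
      · exact ⟨0, by simpa using hfix⟩
      · obtain ⟨k, hk⟩ := ih (d (parF p i)) (by rw [← hdi]; exact hd i hi hfix)
          (parF p i) (parF_lt hv hi) rfl
        exact ⟨k + 1, by rw [Function.iterate_succ_apply]; exact hk⟩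
  intro i hi; exact H (d i) i hi rfl

noncomputable def depthD (p : List Int) (i : Nat) : Nat :=
  sInf {k | parF p ((parF p)^[k] i) = (parF p)^[k] i}

theorem depth_fix {p : List Int} {i : Nat}
    (h : ∃ k, parF p ((parF p)^[k] i) = (parF p)^[k] i) :
    parF p ((parF p)^[depthD p i] i) = (parF p)^[depthD p i] i :=
  Nat.sInf_mem h

theorem depth_min {p : List Int} {i : Nat}
    {k : Nat} (hk : k < depthD p i) : parF p ((parF p)^[k] i) ≠ (parF p)^[k] i := by
  intro hmem
  exact Nat.notMem_of_lt_sInf (s := {k | parF p ((parF p)^[k] i) = (parF p)^[k] i}) hk hmem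

theorem depth_le {p : List Int} {i k : Nat}
    (h : parF p ((parF p)^[k] i) = (parF p)^[k] i) : depthD p i ≤ k :=
  Nat.sInf_le (show k ∈ {k | parF p ((parF p)^[k] i) = (parF p)^[k] i} from h)

theorem iter_stable {p : List Int} {i : Nat} (h : ∃ k, parF p ((parF p)^[k] i) = (parF p)^[k] i)
    {k : Nat} (hk : depthD p i ≤ k) : (parF p)^[k] i = (parF p)^[depthD p i] i := by
  obtain ⟨j, rfl⟩ := Nat.exists_eq_add_of_le hk
  induction j with
  | zero => rfl
  | succ j ih =>
    have hstep : depthD p i + (j + 1) = (depthD p i + j) + 1 := rfl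
    rw [hstep, Function.iterate_succ_apply', ih (Nat.le_add_right _ _)]
    exact depth_fix h

theorem depth_succ {p : List Int} {d : Nat → Nat} (hv : ValidP p) (hd : MeasP p d)
    {i : Nat} (hi : i < p.length) (hni : parF p i ≠ i) :
    depthD p i = depthD p (parF p i) + 1 := by
  have hy : parF p i < p.length := parF_lt hv hi
  have hEi := ex_fix hv hd i hi
  have hEy := ex_fix hv hd (parF p i) hy
  have hle : depthD p i ≤ depthD p (parF p i) + 1 := by
    apply depth_le
    rw [Function.iterate_succ_apply]
    exact depth_fix hEy
  have hge : depthD p (parF p i) + 1 ≤ depthD p i := by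
    cases hD : depthD p i with
    | zero =>
      exfalso
      have := depth_fix hEi
      rw [hD] at this
      exact hni (by simpa using this)
    | succ t =>
      have hfix : parF p ((parF p)^[t] (parF p i)) = (parF p)^[t] (parF p i) := by
        have := depth_fix hEi
        rw [hD, Function.iterate_succ_apply] at this
        exact this
      have := depth_le hfix
      omega
  omega

theorem depth_lt {p : List Int} {d : Nat → Nat} (hv : ValidP p) (hd : MeasP p d)
    {i : Nat} (hi : i < p.length) : depthD p i < p.length := by
  have hchain : ∀ a, a < depthD p i →
      d ((parF p)^[a + 1] i) < d ((parF p)^[a] i) := by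
    intro a ha
    rw [Function.iterate_succ_apply']
    exact hd _ (iter_lt hv hi a) (depth_min ha)
  have mono : ∀ b, b ≤ depthD p i → ∀ a, a < b →
      d ((parF p)^[b] i) < d ((parF p)^[a] i) := by
    intro b
    induction b with
    | zero => omega
    | succ b ih =>
      intro hb a ha
      have h1 : d ((parF p)^[b + 1] i) < d ((parF p)^[b] i) := hchain b (by omega)
      rcases Nat.lt_succ_iff_lt_or_eq.mp ha with h | rfl
      · exact lt_trans h1 (ih (by omega) a h)
      · exact h1
  have hnodup : ((List.range (depthD p i + 1)).map (fun k => (parF p)^[k] i)).Nodup := by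
    refine (List.nodup_map_iff_inj_on List.nodup_range).mpr ?_
    intro a ha b hb hab
    simp only [List.mem_range] at ha hb
    by_contra hne
    rcases Nat.lt_or_ge a b with h | h
    · have := mono b (by omega) a h
      rw [hab] at this; omega
    · have hba : b < a := by omega
      have := mono a (by omega) b hba
      rw [hab] at this; omega
  have hsub : ((List.range (depthD p i + 1)).map (fun k => (parF p)^[k] i)).toFinset ⊆
      Finset.range p.length := by
    intro x hx
    simp only [List.mem_toFinset, List.mem_map, List.mem_range] at hx
    obtain ⟨k, _, rfl⟩ := hx
    simpa using iter_lt hv hi k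
  have hcard := Finset.card_le_card hsub
  rw [List.toFinset_card_of_nodup hnodup] at hcard
  simp [Finset.card_range] at hcard
  omega

theorem Root_eq_depth {p : List Int} {d : Nat → Nat} (hv : ValidP p) (hd : MeasP p d)
    {i : Nat} (hi : i < p.length) : RootP p i = (parF p)^[depthD p i] i := by
  exact iter_stable (ex_fix hv hd i hi) (le_of_lt (depth_lt hv hd hi))

theorem Root_fix {p : List Int} {d : Nat → Nat} (hv : ValidP p) (hd : MeasP p d)
    {i : Nat} (hi : i < p.length) : parF p (RootP p i) = RootP p i := by
  rw [Root_eq_depth hv hd hi]; exact depth_fix (ex_fix hv hd i hi)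

theorem Root_lt {p : List Int} (hv : ValidP p) {i : Nat} (hi : i < p.length) :
    RootP p i < p.length := iter_lt hv hi _

theorem Root_root {p : List Int} {i : Nat} (hfix : parF p i = i) : RootP p i = i :=
  Function.iterate_fixed hfix _

theorem Root_step {p : List Int} {d : Nat → Nat} (hv : ValidP p) (hd : MeasP p d)
    {i : Nat} (hi : i < p.length) (hni : parF p i ≠ i) :
    RootP p i = RootP p (parF p i) := by
  have hy : parF p i < p.length := parF_lt hv hi
  have hEy := ex_fix hv hd (parF p i) hy
  have hn1 : p.length = (p.length - 1) + 1 := by omega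
  have hDi := depth_lt hv hd hi
  have hDy : depthD p (parF p i) ≤ p.length - 1 := by
    have := depth_succ hv hd hi hni; omega
  have h1 : RootP p i = (parF p)^[p.length - 1] (parF p i) := by
    unfold RootP
    conv_lhs => rw [hn1]
    rw [Function.iterate_succ_apply]
  rw [h1]
  unfold RootP
  rw [iter_stable hEy hDy]
  exact (iter_stable hEy (by omega : depthD p (parF p i) ≤ p.length)).symm

theorem canon {p : List Int} {d : Nat → Nat} (hv : ValidP p) (hd : MeasP p d) :
    MeasP p (depthD p) ∧ ∀ i, i < p.length → depthD p i < p.length := by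
  constructor
  · intro i hi hni
    rw [depth_succ hv hd hi hni]; omega
  · intro i hi; exact depth_lt hv hd hi

-- effect of `p[j] := v` on the parent function
theorem parF_set {p : List Int} {j : Nat} (hj : j < p.length) (v : Int) (i : Nat) :
    parF (p.set j v) i = if i = j then v.toNat else parF p i := by
  unfold parF
  by_cases hij : i = j
  · subst hij
    simp [List.getD, List.getElem?_set_self hj]
  · simp [List.getD, List.getElem?_set_ne (Ne.symm hij), hij]

theorem ValidP_set {p : List Int} (hv : ValidP p) {j : Nat} (hj : j < p.length) {v : Int}
    (h0 : 0 ≤ v) (h1 : v < (p.length : Int)) : ValidP (p.set j v) := by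
  intro i hi
  rw [List.length_set] at hi
  by_cases hij : i = j
  · subst hij
    simp only [List.length_set, List.getD, List.getElem?_set_self hj]
    exact ⟨h0, h1⟩
  · simp only [List.length_set, List.getD, List.getElem?_set_ne (Ne.symm hij)]
    exact hv i hi

-- the path-halving write inside find: state facts about p' = p.set x (p[parF p x])
theorem halve {p : List Int} {d : Nat → Nat} (hv : ValidP p) (hd : MeasP p d)
    {x : Nat} (hx : x < p.length) (hnx : parF p x ≠ x) :
    ValidP (p.set x (p.getD (parF p x) 0)) ∧
    MeasP (p.set x (p.getD (parF p x) 0)) d ∧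
    (∀ i, i < p.length → RootP (p.set x (p.getD (parF p x) 0)) i = RootP p i) := by
  have hy : parF p x < p.length := parF_lt hv hx
  have hv0 := hv (parF p x) hy
  have hvalid : ValidP (p.set x (p.getD (parF p x) 0)) :=
    ValidP_set hv hx hv0.1 hv0.2
  have hlen : (p.set x (p.getD (parF p x) 0)).length = p.length := by simp
  have hpar : ∀ i, parF (p.set x (p.getD (parF p x) 0)) i
      = if i = x then parF p (parF p x) else parF p i := by
    intro i
    rw [parF_set hx]
    rfl
  have hdw : parF p (parF p x) ≠ x → d (parF p (parF p x)) < d x := by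
    intro _
    by_cases hyfix : parF p (parF p x) = parF p x
    · rw [hyfix]; exact hd x hx hnx
    · exact lt_trans (hd (parF p x) hy hyfix) (hd x hx hnx)
  have hwx : parF p (parF p x) ≠ x := by
    intro hw
    by_cases hyfix : parF p (parF p x) = parF p x
    · rw [hyfix] at hw; exact hnx hw
    · have h1 := hd (parF p x) hy hyfix
      have h2 := hd x hx hnx
      rw [hw] at h1; omega
  have hmeas : MeasP (p.set x (p.getD (parF p x) 0)) d := by
    intro i hi hni
    rw [hlen] at hi
    rw [hpar i] at hni ⊢
    by_cases hix : i = x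
    · subst hix
      rw [if_pos rfl] at hni ⊢
      exact hdw hni
    · rw [if_neg hix] at hni ⊢
      exact hd i hi hni
  refine ⟨hvalid, hmeas, ?_⟩
  have H : ∀ m i, i < p.length → d i = m →
      RootP (p.set x (p.getD (parF p x) 0)) i = RootP p i := by
    intro m
    induction m using Nat.strong_induction_on with
    | _ m ih =>
      intro i hi hdi
      by_cases hfix : parF p i = i
      · have hix : i ≠ x := fun h => hnx (h ▸ hfix)
        have hfix' : parF (p.set x (p.getD (parF p x) 0)) i = i := by
          rw [hpar i, if_neg hix]; exact hfix
        rw [Root_root hfix', Root_root hfix]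
      · by_cases hix : i = x
        · have hnix : parF (p.set x (p.getD (parF p x) 0)) i ≠ i := by
            rw [hpar i, if_pos hix, hix]; exact hwx
          have hstep' : RootP (p.set x (p.getD (parF p x) 0)) i
              = RootP (p.set x (p.getD (parF p x) 0)) (parF p (parF p x)) := by
            have := Root_step hvalid hmeas (i := i) (by omega) hnix
            rw [hpar i, if_pos hix] at this
            exact this
          rw [hstep']
          have hww : parF p (parF p x) < p.length := parF_lt hv hy
          rw [ih (d (parF p (parF p x))) (by rw [← hdi, hix]; exact hdw hwx) _ hww rfl]
          rw [hix]
          have hfx : parF p x ≠ x := hnx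
          by_cases hyfix : parF p (parF p x) = parF p x
          · rw [hyfix]
            exact (Root_step hv hd hx hfx).symm
          · rw [← Root_step hv hd hy hyfix]
            exact (Root_step hv hd hx hfx).symm
        · have hstep' : RootP (p.set x (p.getD (parF p x) 0)) i
              = RootP (p.set x (p.getD (parF p x) 0)) (parF p i) := by
            have := Root_step hvalid hmeas (i := i) (by omega) (by rw [hpar i, if_neg hix]; exact hfix)
            rw [hpar i, if_neg hix] at this
            exact this
          rw [hstep']
          rw [ih (d (parF p i)) (by rw [← hdi]; exact hd i hi hfix) _ (parF_lt hv hi) rfl]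
          exact (Root_step hv hd hi hfix).symm
  intro i hi
  exact H (d i) i hi rfl

theorem find_spec {d : Nat → Nat} :
    ∀ (fuel : Nat) (p : List Int) (x : Nat), MeasP p d → ValidP p → x < p.length →
    d x + 1 ≤ fuel →
    (findA fuel p (x : Int)).2 = ((RootP p x : Nat) : Int) ∧
    (findA fuel p (x : Int)).1.length = p.length ∧
    ValidP (findA fuel p (x : Int)).1 ∧
    MeasP (findA fuel p (x : Int)).1 d ∧
    (∀ i, i < p.length → RootP (findA fuel p (x : Int)).1 i = RootP p i) := by
  have H : ∀ m (fuel : Nat) (p : List Int) (x : Nat), MeasP p d → ValidP p →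
      x < p.length → d x = m → d x + 1 ≤ fuel →
      (findA fuel p (x : Int)).2 = ((RootP p x : Nat) : Int) ∧
      (findA fuel p (x : Int)).1.length = p.length ∧
      ValidP (findA fuel p (x : Int)).1 ∧
      MeasP (findA fuel p (x : Int)).1 d ∧
      (∀ i, i < p.length → RootP (findA fuel p (x : Int)).1 i = RootP p i) := by
    intro m
    induction m using Nat.strong_induction_on with
    | _ m ih =>
      intro fuel p x hd hv hx hdx hf
      cases fuel with
      | zero => omega
      | succ f =>
        have hval : PySem.List.pyGetD p (x : Int) 0 = p.getD x 0 :=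
          PySem.List.pyGetD_natCast p x 0
        have hcast : p.getD x 0 = ((parF p x : Nat) : Int) := by
          have := (hv x hx).1; unfold parF; omega
        by_cases hfix : parF p x = x
        · have hcond : PySem.List.pyGetD p (x : Int) 0 = (x : Int) := by
            rw [hval, hcast, hfix]
          have hres : findA (f + 1) p (x : Int) = (p, (x : Int)) := by
            simp only [findA]
            rw [if_pos hcond]
          rw [hres]
          exact ⟨by simp [Root_root hfix], rfl, hv, hd, fun i _ => rfl⟩
        · have hy : parF p x < p.length := parF_lt hv hx
          have hcastAll : ∀ y, y < p.length → p.getD y 0 = ((parF p y : Nat) : Int) := by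
            intro y hy'
            have := (hv y hy').1; unfold parF; omega
          have hcast2 : p.getD (parF p x) 0 = ((parF p (parF p x) : Nat) : Int) :=
            hcastAll _ hy
          have hcond : ¬ (PySem.List.pyGetD p (x : Int) 0 = (x : Int)) := by
            rw [hval, hcast]
            intro h
            exact hfix (by exact_mod_cast h)
          have hres : findA (f + 1) p (x : Int)
              = findA f (p.set x ((parF p (parF p x) : Nat) : Int))
                  ((parF p (parF p x) : Nat) : Int) := by
            simp only [findA]
            rw [if_neg hcond, hval, hcast]
            rw [PySem.List.pyGetD_natCast, PySem.List.pySetD_natCast]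
            rw [hcast2]
          obtain ⟨hvalid', hmeas', hroots'⟩ := halve hv hd hx hfix
          rw [hcast2] at hvalid' hmeas' hroots'
          have hlen' : (p.set x ((parF p (parF p x) : Nat) : Int)).length = p.length := by simp
          have hdw : d (parF p (parF p x)) < d x := by
            by_cases hyfix : parF p (parF p x) = parF p x
            · rw [hyfix]; exact hd x hx hfix
            · exact lt_trans (hd (parF p x) hy hyfix) (hd x hx hfix)
          have hw : parF p (parF p x) < p.length := parF_lt hv hy
          have hIH := ih (d (parF p (parF p x))) (by omega) f
            (p.set x ((parF p (parF p x) : Nat) : Int)) (parF p (parF p x)) hmeas' hvalid'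
            (by rw [hlen']; exact hw) rfl (by omega)
          rw [hres]
          obtain ⟨ih1, ih2, ih3, ih4, ih5⟩ := hIH
          have hRw : RootP p (parF p (parF p x)) = RootP p x := by
            by_cases hyfix : parF p (parF p x) = parF p x
            · rw [hyfix]; exact (Root_step hv hd hx hfix).symm
            · rw [← Root_step hv hd hy hyfix]
              exact (Root_step hv hd hx hfix).symm
          refine ⟨?_, by rw [ih2, hlen'], ih3, ih4, ?_⟩
          · rw [ih1, hroots' _ hw, hRw]
          · intro i hi
            rw [ih5 i (by rw [hlen']; exact hi), hroots' i hi]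
  intro fuel p x hd hv hx hf
  exact H (d x) fuel p x hd hv hx rfl hf

theorem normN_lt {n : Nat} {x : Int} (hx : PySem.Raise.InRange n x) : normN n x < n := by
  rcases hx with ⟨h1, h2⟩; unfold normN; split <;> omega

-- pyGetD on an in-range (possibly negative) index, via normN
theorem pyGetD_norm {xs : List Int} {x : Int} (hx : PySem.Raise.InRange xs.length x) (dv : Int) :
    PySem.List.pyGetD xs x dv = xs.getD (normN xs.length x) dv := by
  rcases hx with ⟨h1, h2⟩
  by_cases h0 : 0 ≤ x
  · rw [PySem.List.pyGetD_eq_getElem xs dv h0 h2]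
    unfold normN
    rw [if_neg (by omega)]
    exact (List.getD_eq_getElem xs dv (by omega)).symm
  · have h0' : x < 0 := by omega
    have hk : x = -(((-x).toNat : Nat) : Int) := by omega
    rw [hk, PySem.List.pyGetD_neg_natCast xs (-x).toNat dv (by omega) (by omega)]
    unfold normN
    rw [if_pos (by omega)]
    have heq : (-(((-x).toNat : Nat) : Int) + (xs.length : Int)).toNat
        = xs.length - (-x).toNat := by omega
    rw [heq]
    exact (List.getD_eq_getElem xs dv (by omega)).symm

theorem pySetD_norm {xs : List Int} {x : Int} (hx : PySem.Raise.InRange xs.length x) (v : Int) :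
    PySem.List.pySetD xs x v = xs.set (normN xs.length x) v := by
  rcases hx with ⟨h1, h2⟩
  by_cases h0 : 0 ≤ x
  · rw [PySem.List.pySetD_of_nonneg xs v h0]
    unfold normN
    rw [if_neg (by omega)]
  · simp only [PySem.List.pySetD, PySem.List.pySet?, PySem.List.pyIdx?,
      if_neg h0, if_pos h1, Option.map_some, Option.getD_some]
    unfold normN
    rw [if_pos (by omega)]
    congr 1
    omega

-- entry point: index may be negative (Python wrap); fuel p.length + 1 suffices
theorem find_entry {p : List Int} {d : Nat → Nat} (hd : MeasP p d)
    (hB : ∀ i, i < p.length → d i < p.length) (hv : ValidP p) (x : Int)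
    (hx : PySem.Raise.InRange p.length x) :
    (findA (p.length + 1) p x).2 = ((RootP p (normN p.length x) : Nat) : Int) ∧
    (findA (p.length + 1) p x).1.length = p.length ∧
    ValidP (findA (p.length + 1) p x).1 ∧
    (∃ d', MeasP (findA (p.length + 1) p x).1 d') ∧
    (∀ i, i < p.length → RootP (findA (p.length + 1) p x).1 i = RootP p i) := by
  have hxn : normN p.length x < p.length := normN_lt hx
  by_cases h0 : 0 ≤ x
  · have hxx : ((normN p.length x : Nat) : Int) = x := by
      unfold normN
      rw [if_neg (by omega)]
      omega
    have hfs := find_spec (p.length + 1) p (normN p.length x) hd hv hxn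
      (by have := hB _ hxn; omega)
    rw [hxx] at hfs
    exact ⟨hfs.1, hfs.2.1, hfs.2.2.1, ⟨d, hfs.2.2.2.1⟩, hfs.2.2.2.2⟩
  · -- negative index: one unrolling normalises, then find_spec
    have hneg : x < 0 := by omega
    have hn1 : 0 < p.length := by
      rcases hx with ⟨h1, h2⟩; omega
    have hcastAll : ∀ y, y < p.length → p.getD y 0 = ((parF p y : Nat) : Int) := by
      intro y hy'
      have := (hv y hy').1; unfold parF; omega
    have hpx : PySem.List.pyGetD p x 0 = ((parF p (normN p.length x) : Nat) : Int) := by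
      rw [pyGetD_norm hx, List.getD_eq_getElem p 0 hxn,
        ← List.getD_eq_getElem p 0 hxn, hcastAll _ hxn]
    have hcond : ¬ (PySem.List.pyGetD p x 0 = x) := by
      rw [hpx]; intro h; omega
    set x' := normN p.length x with hx'
    have hyx : parF p x' < p.length := parF_lt hv hxn
    have hres0 : findA (p.length + 1) p x
        = findA p.length (PySem.List.pySetD p x (PySem.List.pyGetD p ((parF p x' : Nat) : Int) 0))
            (PySem.List.pyGetD p ((parF p x' : Nat) : Int) 0) := by
      simp only [findA]
      rw [if_neg hcond, hpx]
    rw [hres0]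
    rw [PySem.List.pyGetD_natCast, hcastAll _ hyx, pySetD_norm hx, ← hx']
    by_cases hyfix : parF p x' = x'
    · -- x' is a root: the write is a no-op and one more step returns x'
      have hsetid : p.set x' ((parF p x' : Nat) : Int) = p := by
        rw [← hcastAll _ hxn, List.getD_eq_getElem p 0 hxn]
        exact List.set_getElem_self hxn
      rw [hyfix, hsetid, hyfix]
      have hfs := find_spec p.length p x' hd hv hxn (by have := hB _ hxn; omega)
      exact ⟨by rw [hfs.1, Root_root hyfix], hfs.2.1, hfs.2.2.1,
        ⟨d, hfs.2.2.2.1⟩, hfs.2.2.2.2⟩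
    · -- genuine halving step, then find_spec with fuel p.length
      obtain ⟨hvalid', hmeas', hroots'⟩ := halve hv hd hxn hyfix
      have hc2 : p.getD (parF p x') 0 = ((parF p (parF p x') : Nat) : Int) :=
        hcastAll _ hyx
      rw [hc2] at hvalid' hmeas' hroots'
      have hlen' : (p.set x' ((parF p (parF p x') : Nat) : Int)).length = p.length := by simp
      have hdw : d (parF p (parF p x')) < d x' := by
        by_cases hwf : parF p (parF p x') = parF p x'
        · rw [hwf]; exact hd x' hxn hyfix
        · exact lt_trans (hd (parF p x') hyx hwf) (hd x' hxn hyfix)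
      have hw : parF p (parF p x') < p.length := parF_lt hv hyx
      have hfs := find_spec p.length (p.set x' ((parF p (parF p x') : Nat) : Int))
        (parF p (parF p x')) hmeas' hvalid' (by rw [hlen']; exact hw)
        (by have := hB _ hxn; omega)
      have hRw : RootP p (parF p (parF p x')) = RootP p x' := by
        by_cases hwf : parF p (parF p x') = parF p x'
        · rw [hwf]; exact (Root_step hv hd hxn hyfix).symm
        · rw [← Root_step hv hd hyx hwf]
          exact (Root_step hv hd hxn hyfix).symm
      refine ⟨?_, by rw [hfs.2.1, hlen'], hfs.2.2.1, ⟨d, hfs.2.2.2.1⟩, ?_⟩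
      · rw [hfs.1, hroots' _ hw, hRw]
      · intro i hi
        rw [hfs.2.2.2.2 i (by rw [hlen']; exact hi), hroots' i hi]


-- linking two distinct roots: p3 = p2.set rb ra
theorem link {p2 : List Int} {d2 : Nat → Nat} (hv : ValidP p2) (hd : MeasP p2 d2)
    {ra rb : Nat} (hra : ra < p2.length) (hrb : rb < p2.length)
    (hfa : parF p2 ra = ra) (hfb : parF p2 rb = rb) (hne : ra ≠ rb) :
    ValidP (p2.set rb (ra : Int)) ∧
    (∃ d3, MeasP (p2.set rb (ra : Int)) d3) ∧
    (∀ i, i < p2.length →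
      RootP (p2.set rb (ra : Int)) i = if RootP p2 i = rb then ra else RootP p2 i) := by
  have hvalid : ValidP (p2.set rb (ra : Int)) :=
    ValidP_set hv hrb (by positivity) (by exact_mod_cast hra)
  have hlen : (p2.set rb (ra : Int)).length = p2.length := by simp
  have hpar : ∀ i, parF (p2.set rb (ra : Int)) i = if i = rb then ra else parF p2 i := by
    intro i
    rw [parF_set hrb]
    simp
  have hmeas : MeasP (p2.set rb (ra : Int))
      (fun i => d2 i + (if RootP p2 i = rb then d2 ra + 1 else 0)) := by
    intro i hi hni
    rw [hlen] at hi
    beta_reduce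
    rw [hpar i] at hni ⊢
    by_cases hib : i = rb
    · rw [if_pos hib] at hni ⊢
      have e1 : RootP p2 ra = ra := Root_root hfa
      have e2 : RootP p2 i = rb := by rw [hib]; exact Root_root hfb
      rw [e1, e2, if_neg hne, if_pos rfl]
      omega
    · rw [if_neg hib] at hni ⊢
      have e3 : RootP p2 (parF p2 i) = RootP p2 i := (Root_step hv hd hi hni).symm
      rw [e3]
      have := hd i hi hni
      split_ifs <;> omega
  refine ⟨hvalid, ⟨_, hmeas⟩, ?_⟩
  have H : ∀ m i, i < p2.length → d2 i = m →
      RootP (p2.set rb (ra : Int)) i = if RootP p2 i = rb then ra else RootP p2 i := by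
    intro m
    induction m using Nat.strong_induction_on with
    | _ m ih =>
      intro i hi hdi
      by_cases hfix : parF p2 i = i
      · by_cases hib : i = rb
        · subst hib
          have e2 : RootP p2 i = i := Root_root hfix
          rw [e2, if_pos rfl]
          have hstep : RootP (p2.set i (ra : Int)) i = RootP (p2.set i (ra : Int)) ra := by
            have hni : parF (p2.set i (ra : Int)) i ≠ i := by
              rw [hpar i, if_pos rfl]; exact fun h => hne h
            have := Root_step hvalid hmeas (i := i) (by omega) hni
            rw [hpar i, if_pos rfl] at this
            exact this
          rw [hstep]
          apply Root_root
          rw [hpar ra, if_neg hne]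
          exact hfa
        · have hfix' : parF (p2.set rb (ra : Int)) i = i := by
            rw [hpar i, if_neg hib]; exact hfix
          rw [Root_root hfix', Root_root hfix, if_neg hib]
      · have hib : i ≠ rb := by
          intro h; rw [h] at hfix; exact hfix hfb
        have hni' : parF (p2.set rb (ra : Int)) i ≠ i := by
          rw [hpar i, if_neg hib]; exact hfix
        have hstep : RootP (p2.set rb (ra : Int)) i
            = RootP (p2.set rb (ra : Int)) (parF p2 i) := by
          have := Root_step hvalid hmeas (i := i) (by omega) hni'
          rw [hpar i, if_neg hib] at this
          exact this
        rw [hstep]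
        rw [ih (d2 (parF p2 i)) (by rw [← hdi]; exact hd i hi hfix) _ (parF_lt hv hi) rfl]
        rw [← Root_step hv hd hi hfix]
  intro i hi
  exact H (d2 i) i hi rfl

theorem union_spec {p r : List Int} (hv : ValidP p) (hm : ∃ d, MeasP p d) (a b : Int)
    (ha : PySem.Raise.InRange p.length a) (hb : PySem.Raise.InRange p.length b) :
    (unionA p r a b).1.length = p.length ∧
    ValidP (unionA p r a b).1 ∧
    (∃ d, MeasP (unionA p r a b).1 d) ∧
    (∃ RA RB,
      ((RA = RootP p (normN p.length a) ∧ RB = RootP p (normN p.length b)) ∨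
       (RA = RootP p (normN p.length b) ∧ RB = RootP p (normN p.length a))) ∧
      ∀ i, i < p.length →
        RootP (unionA p r a b).1 i = if RootP p i = RB then RA else RootP p i) := by
  obtain ⟨d0, hd0⟩ := hm
  obtain ⟨hcm, hcb⟩ := canon hv hd0
  obtain ⟨ha2, halen, havalid, ⟨da, hda⟩, haroots⟩ := find_entry hcm hcb hv a ha
  set p1 := (findA (p.length + 1) p a).1 with hp1
  obtain ⟨hcm1, hcb1⟩ := canon havalid hda
  have hb1 : PySem.Raise.InRange p1.length b := by rw [halen]; exact hb
  obtain ⟨hb2, hblen, hbvalid, ⟨db, hdb⟩, hbroots⟩ := find_entry hcm1 hcb1 havalid b hb1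
  set p2 := (findA (p1.length + 1) p1 b).1 with hp2
  have hnaL : normN p.length a < p.length := normN_lt ha
  have hnbL : normN p.length b < p.length := normN_lt hb
  have hnb_eq : normN p1.length b = normN p.length b := by rw [halen]
  have hp2len : p2.length = p.length := by rw [hblen, halen]
  have hp2roots : ∀ i, i < p.length → RootP p2 i = RootP p i := by
    intro i hi
    rw [hbroots i (by rw [halen]; exact hi), haroots i hi]
  have hb2' : (findA (p1.length + 1) p1 b).2 = ((RootP p (normN p.length b) : Nat) : Int) := by
    rw [hb2, hnb_eq, haroots _ hnbL]
  have hraN : RootP p (normN p.length a) < p.length := Root_lt hv hnaL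
  have hrbN : RootP p (normN p.length b) < p.length := Root_lt hv hnbL
  by_cases hceq : (findA (p.length + 1) p a).2 = (findA (p1.length + 1) p1 b).2
  · have hres : unionA p r a b = (p2, r) := by
      simp only [unionA]
      rw [if_pos hceq]
    rw [hres]
    have hRR : RootP p (normN p.length a) = RootP p (normN p.length b) := by
      rw [ha2, hb2'] at hceq
      exact_mod_cast hceq
    refine ⟨hp2len, hbvalid, ⟨db, hdb⟩,
      RootP p (normN p.length a), RootP p (normN p.length b), Or.inl ⟨rfl, rfl⟩, ?_⟩
    intro i hi
    rw [hp2roots i hi]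
    by_cases hc : RootP p i = RootP p (normN p.length b)
    · rw [if_pos hc, hRR, hc]
    · rw [if_neg hc]
  · have hNe : RootP p (normN p.length a) ≠ RootP p (normN p.length b) := by
      intro h
      apply hceq
      rw [ha2, hb2', h]
    have hfixa : parF p2 (RootP p (normN p.length a)) = RootP p (normN p.length a) := by
      have := Root_fix hbvalid hdb (i := normN p.length a) (by rw [hp2len]; exact hnaL)
      rw [hp2roots _ hnaL] at this
      exact this
    have hfixb : parF p2 (RootP p (normN p.length b)) = RootP p (normN p.length b) := by
      have := Root_fix hbvalid hdb (i := normN p.length b) (by rw [hp2len]; exact hnbL)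
      rw [hp2roots _ hnbL] at this
      exact this
    by_cases hrank : PySem.List.pyGetD r (findA (p.length + 1) p a).2 0
        < PySem.List.pyGetD r (findA (p1.length + 1) p1 b).2 0
    · -- ranks swap: link sets p2[raN] := rbN
      have hres : (unionA p r a b).1
          = p2.set (RootP p (normN p.length a)) ((RootP p (normN p.length b) : Nat) : Int) := by
        simp only [unionA]
        rw [if_neg hceq, if_pos hrank]
        rw [ha2, hb2']
        rw [PySem.List.pySetD_natCast]
      obtain ⟨hlv, hlm, hlroots⟩ := link hbvalid hdb
        (by rw [hp2len]; exact hrbN) (by rw [hp2len]; exact hraN) hfixb hfixa (Ne.symm hNe)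
      rw [hres]
      refine ⟨by rw [List.length_set, hp2len], hlv, hlm,
        RootP p (normN p.length b), RootP p (normN p.length a), Or.inr ⟨rfl, rfl⟩, ?_⟩
      intro i hi
      rw [hlroots i (by rw [hp2len]; exact hi), hp2roots i hi]
    · -- no swap: link sets p2[rbN] := raN
      have hres : (unionA p r a b).1
          = p2.set (RootP p (normN p.length b)) ((RootP p (normN p.length a) : Nat) : Int) := by
        simp only [unionA]
        rw [if_neg hceq, if_neg hrank]
        rw [ha2, hb2']
        rw [PySem.List.pySetD_natCast]
      obtain ⟨hlv, hlm, hlroots⟩ := link hbvalid hdb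
        (by rw [hp2len]; exact hraN) (by rw [hp2len]; exact hrbN) hfixa hfixb hNe
      rw [hres]
      refine ⟨by rw [List.length_set, hp2len], hlv, hlm,
        RootP p (normN p.length a), RootP p (normN p.length b), Or.inl ⟨rfl, rfl⟩, ?_⟩
      intro i hi
      rw [hlroots i (by rw [hp2len]; exact hi), hp2roots i hi]

theorem merge_eq_iff {x y ra rb : Nat} {pp qq a b : Int} (hab : a ≠ b) (hrarb : ra ≠ rb)
    (h1 : x = ra ↔ pp = a) (h2 : x = rb ↔ pp = b) (h3 : y = ra ↔ qq = a) (h4 : y = rb ↔ qq = b)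
    (h5 : x = y ↔ pp = qq) {RA RB : Nat}
    (hset : (RA = ra ∧ RB = rb) ∨ (RA = rb ∧ RB = ra)) :
    ((if x = RB then RA else x) = (if y = RB then RA else y) ↔
     (if pp = b then a else pp) = (if qq = b then a else qq)) := by
  rcases hset with ⟨rfl, rfl⟩ | ⟨rfl, rfl⟩ <;>
    split_ifs with hx1 hy1 hy1 <;>
    constructor <;> intro h <;> simp_all

theorem getD_map_f {lab : List Int} {i : Nat} (hi : i < lab.length) (f : Int → Int) :
    (lab.map f).getD i 0 = f (lab.getD i 0) := by
  rw [List.getD_eq_getElem _ _ (by simpa using hi), List.getD_eq_getElem _ _ hi]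
  simp

theorem normN_nonneg {n : Nat} {x : Int} (h0 : 0 ≤ x) : normN n x = x.toNat := by
  unfold normN
  rw [if_neg (by omega)]

-- one edge preserves the bisimulation
theorem edge_step {n : Nat} {p r lab : List Int} (hlen : p.length = n) (hlab : lab.length = n)
    (hv : ValidP p) (hm : ∃ d, MeasP p d) (hRel : RelP p lab n) (u v : Int)
    (hu : PySem.Raise.InRange n (u - 1)) (hw : PySem.Raise.InRange n (v - 1)) :
    (unionA p r (u - 1) (v - 1)).1.length = n ∧
    ValidP (unionA p r (u - 1) (v - 1)).1 ∧
    (∃ d, MeasP (unionA p r (u - 1) (v - 1)).1 d) ∧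
    RelP (unionA p r (u - 1) (v - 1)).1
      (let a := PySem.List.pyGetD lab (u - 1) 0
       let b := PySem.List.pyGetD lab (v - 1) 0
       if a ≠ b then lab.map (fun x => if x = b then a else x) else lab) n := by
  have ha : PySem.Raise.InRange p.length (u - 1) := by rw [hlen]; exact hu
  have hb : PySem.Raise.InRange p.length (v - 1) := by rw [hlen]; exact hw
  obtain ⟨hulen, huv, hum, RA, RB, hRAB, hform⟩ := union_spec hv hm (u - 1) (v - 1) ha hb
  have hnu : normN n (u - 1) < n := normN_lt hu
  have hnv : normN n (v - 1) < n := normN_lt hw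
  have hnorm_eq_u : normN p.length (u - 1) = normN n (u - 1) := by rw [hlen]
  have hnorm_eq_v : normN p.length (v - 1) = normN n (v - 1) := by rw [hlen]
  rw [hnorm_eq_u, hnorm_eq_v] at hRAB
  have hga : PySem.List.pyGetD lab (u - 1) 0 = lab.getD (normN n (u - 1)) 0 := by
    rw [pyGetD_norm (by rw [hlab]; exact hu), hlab]
  have hgb : PySem.List.pyGetD lab (v - 1) 0 = lab.getD (normN n (v - 1)) 0 := by
    rw [pyGetD_norm (by rw [hlab]; exact hw), hlab]
  have hab_iff := hRel (normN n (u - 1)) (normN n (v - 1)) hnu hnv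
  rw [hlen] at hform
  by_cases hcase : lab.getD (normN n (u - 1)) 0 = lab.getD (normN n (v - 1)) 0
  · -- equal labels: both sides leave their state's partition unchanged
    have hroots_eq : RootP p (normN n (u - 1)) = RootP p (normN n (v - 1)) :=
      hab_iff.mpr hcase
    have hRARB : RA = RB := by
      rcases hRAB with ⟨h1, h2⟩ | ⟨h1, h2⟩ <;> rw [h1, h2] <;> [exact hroots_eq; exact hroots_eq.symm]
    have hBres : (let a := PySem.List.pyGetD lab (u - 1) 0
       let b := PySem.List.pyGetD lab (v - 1) 0
       if a ≠ b then lab.map (fun x => if x = b then a else x) else lab) = lab := by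
      simp only [hga, hgb]
      rw [if_neg (by simpa using hcase)]
    rw [hBres]
    refine ⟨hulen.trans hlen, huv, hum, ?_⟩
    intro i j hi hj
    have hfi : RootP (unionA p r (u - 1) (v - 1)).1 i = RootP p i := by
      rw [hform i hi]
      by_cases hc : RootP p i = RB
      · rw [if_pos hc, ← hRARB] at *
        rw [hc, hRARB]
      · rw [if_neg hc]
    have hfj : RootP (unionA p r (u - 1) (v - 1)).1 j = RootP p j := by
      rw [hform j hj]
      by_cases hc : RootP p j = RB
      · rw [if_pos hc, ← hRARB] at *
        rw [hc, hRARB]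
      · rw [if_neg hc]
    rw [hfi, hfj]
    exact hRel i j hi hj
  · -- distinct labels: the two classes are merged on both sides
    have hroots_ne : RootP p (normN n (u - 1)) ≠ RootP p (normN n (v - 1)) :=
      fun h => hcase (hab_iff.mp h)
    have hBres : (let a := PySem.List.pyGetD lab (u - 1) 0
       let b := PySem.List.pyGetD lab (v - 1) 0
       if a ≠ b then lab.map (fun x => if x = b then a else x) else lab)
        = lab.map (fun x =>
            if x = lab.getD (normN n (v - 1)) 0 then lab.getD (normN n (u - 1)) 0 else x) := by
      simp only [hga, hgb]
      rw [if_pos (by simpa using hcase)]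
    rw [hBres]
    refine ⟨hulen.trans hlen, huv, hum, ?_⟩
    intro i j hi hj
    rw [hform i hi, hform j hj]
    rw [getD_map_f (by rw [hlab]; exact hi), getD_map_f (by rw [hlab]; exact hj)]
    exact merge_eq_iff hcase hroots_ne
      (hRel i (normN n (u - 1)) hi hnu) (hRel i (normN n (v - 1)) hi hnv)
      (hRel j (normN n (u - 1)) hj hnu) (hRel j (normN n (v - 1)) hj hnv)
      (hRel i j hi hj) hRAB

theorem loop_inv {n : Nat} :
    ∀ (edges : List (Int × Int)) (p r lab : List Int), p.length = n → lab.length = n →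
    ValidP p → (∃ d, MeasP p d) → RelP p lab n →
    (∀ uv ∈ edges, PySem.Raise.InRange n (uv.1 - 1) ∧ PySem.Raise.InRange n (uv.2 - 1)) →
    (edges.foldl (fun st uv => unionA st.1 st.2 (uv.1 - 1) (uv.2 - 1)) (p, r)).1.length = n ∧
    (edges.foldl
      (fun lab uv =>
        let a := PySem.List.pyGetD lab (uv.1 - 1) 0
        let b := PySem.List.pyGetD lab (uv.2 - 1) 0
        if a ≠ b then lab.map (fun x => if x = b then a else x) else lab) lab).length = n ∧
    ValidP (edges.foldl (fun st uv => unionA st.1 st.2 (uv.1 - 1) (uv.2 - 1)) (p, r)).1 ∧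
    (∃ d, MeasP (edges.foldl (fun st uv => unionA st.1 st.2 (uv.1 - 1) (uv.2 - 1)) (p, r)).1 d) ∧
    RelP (edges.foldl (fun st uv => unionA st.1 st.2 (uv.1 - 1) (uv.2 - 1)) (p, r)).1
      (edges.foldl
        (fun lab uv =>
          let a := PySem.List.pyGetD lab (uv.1 - 1) 0
          let b := PySem.List.pyGetD lab (uv.2 - 1) 0
          if a ≠ b then lab.map (fun x => if x = b then a else x) else lab) lab) n := by
  intro edges
  induction edges with
  | nil =>
    intro p r lab hlen hlab hv hm hRel _
    exact ⟨hlen, hlab, hv, hm, hRel⟩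
  | cons uv rest ih =>
    intro p r lab hlen hlab hv hm hRel hall
    simp only [List.foldl_cons]
    have huv := hall uv (List.mem_cons_self)
    have hedge := edge_step (r := r) hlen hlab hv hm hRel uv.1 uv.2 huv.1 huv.2
    obtain ⟨he1, he2, he3, he4⟩ := hedge
    have hlab1 : (let a := PySem.List.pyGetD lab (uv.1 - 1) 0
        let b := PySem.List.pyGetD lab (uv.2 - 1) 0
        if a ≠ b then lab.map (fun x => if x = b then a else x) else lab).length = n := by
      dsimp only
      split
      · simpa using hlab
      · exact hlab
    exact ih (unionA p r (uv.1 - 1) (uv.2 - 1)).1 (unionA p r (uv.1 - 1) (uv.2 - 1)).2 _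
      he1 hlab1 he2 he3 he4 (fun e he => hall e (List.mem_cons_of_mem _ he))

-- the final counting fold of A collects exactly the roots
theorem fold_finds {n : Nat} (g : Nat → Nat) :
    ∀ (is : List Int) (p : List Int) (s : PySem.Set Int), p.length = n → ValidP p →
    (∃ d, MeasP p d) → (∀ i ∈ is, 0 ≤ i ∧ i < (n : Int)) →
    (∀ j, j < n → RootP p j = g j) →
    (is.foldl (fun (acc : List Int × PySem.Set Int) i =>
        let t := findA (acc.1.length + 1) acc.1 i
        (t.1, PySem.Set.add acc.2 t.2)) (p, s)).2 =
      is.foldl (fun s i => PySem.Set.add s ((g i.toNat : Nat) : Int)) s := by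
  intro is
  induction is with
  | nil => intro p s _ _ _ _ _; rfl
  | cons i rest ih =>
    intro p s hplen hv hm hall hg
    simp only [List.foldl_cons]
    obtain ⟨d0, hd0⟩ := hm
    obtain ⟨hcm, hcb⟩ := canon hv hd0
    have hbd := hall i (List.mem_cons_self)
    have hInR : PySem.Raise.InRange p.length i := by
      constructor <;> rw [hplen] <;> omega
    obtain ⟨hf2, hflen, hfv, hfm, hfroots⟩ := find_entry hcm hcb hv i hInR
    have hval : (findA (p.length + 1) p i).2 = ((g i.toNat : Nat) : Int) := by
      rw [hf2, normN_nonneg hbd.1, hg i.toNat (by omega)]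
    have hg' : ∀ j, j < n → RootP (findA (p.length + 1) p i).1 j = g j := by
      intro j hj
      rw [hfroots j (by omega), hg j hj]
    have := ih (findA (p.length + 1) p i).1 (PySem.Set.add s ((g i.toNat : Nat) : Int))
      (by rw [hflen, hplen]) hfv hfm (fun e he => hall e (List.mem_cons_of_mem _ he)) hg'
    rw [← this]
    dsimp only
    rw [hval]

theorem card_image_eq_of_iff {n : Nat} (f h : Nat → Int)
    (hiff : ∀ i j, i < n → j < n → (f i = f j ↔ h i = h j)) :
    ((Finset.range n).image f).card = ((Finset.range n).image h).card := by
  apply Finset.card_bij (i := fun aa ha => h (Finset.mem_image.mp ha).choose)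
  · intro aa ha
    have hspec := (Finset.mem_image.mp ha).choose_spec
    exact Finset.mem_image.mpr ⟨(Finset.mem_image.mp ha).choose, hspec.1, rfl⟩
  · intro a1 ha1 a2 ha2 heq
    have hs1 := (Finset.mem_image.mp ha1).choose_spec
    have hs2 := (Finset.mem_image.mp ha2).choose_spec
    rw [← hs1.2, ← hs2.2]
    exact (hiff _ _ (Finset.mem_range.mp hs1.1) (Finset.mem_range.mp hs2.1)).mpr heq
  · intro bb hbmem
    obtain ⟨j, hj, rfl⟩ := Finset.mem_image.mp hbmem
    have hmem : f j ∈ (Finset.range n).image f := Finset.mem_image.mpr ⟨j, hj, rfl⟩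
    refine ⟨f j, hmem, ?_⟩
    have hspec := (Finset.mem_image.mp hmem).choose_spec
    exact (hiff _ _ (Finset.mem_range.mp hspec.1) (Finset.mem_range.mp hj)).mp hspec.2

theorem count_eq {L1 L2 : List Int} (hlen : L1.length = L2.length)
    (hiff : ∀ i j, i < L1.length → j < L1.length →
      (L1.getD i 0 = L1.getD j 0 ↔ L2.getD i 0 = L2.getD j 0)) :
    (PySem.Set.ofList L1).length = (PySem.Set.ofList L2).length := by
  have hcard : ∀ L : List Int, (PySem.Set.ofList L).length = L.toFinset.card := by
    intro L
    have h1 : (PySem.Set.ofList L).toFinset = L.toFinset := by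
      ext x
      simp [List.mem_toFinset, PySem.Set.mem_ofList]
    rw [← h1, List.toFinset_card_of_nodup (PySem.Set.nodup_ofList L)]
  have himg : ∀ L : List Int, L.toFinset
      = (Finset.range L.length).image (fun i => L.getD i 0) := by
    intro L
    ext x
    simp only [List.mem_toFinset, Finset.mem_image, Finset.mem_range]
    constructor
    · intro hx
      obtain ⟨i, hi, rfl⟩ := List.mem_iff_getElem.mp hx
      exact ⟨i, hi, List.getD_eq_getElem L 0 hi⟩
    · rintro ⟨i, hi, rfl⟩
      rw [List.getD_eq_getElem L 0 hi]
      exact List.getElem_mem hi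
  rw [hcard, hcard, himg L1, himg L2, ← hlen]
  exact card_image_eq_of_iff _ _ hiff

-- ===== VERDICT (by name: the statement is the Claim_ definition above) =====
theorem minReassignments_spec : Claim_equal_minReassignments := by
  intro ln lf lt hDom hPre
  unfold Spec_minReassignments
  by_cases hguard : (lf.length : Int) < ln - 1
  · simp only [minReassignments, minReassignments_alt]
    rw [if_pos hguard, if_pos hguard]
  · have hedges : ∀ uv ∈ lf.zip lt, PySem.Raise.InRange ln.toNat (uv.1 - 1) ∧
        PySem.Raise.InRange ln.toNat (uv.2 - 1) := by
      rcases hPre with h | h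
      · exact absurd h hguard
      · exact h
    simp only [minReassignments, minReassignments_alt]
    rw [if_neg hguard, if_neg hguard]
    have hp0len : (PySem.List.pyRange 0 ln 1).length = ln.toNat := by
      rw [PySem.List.length_pyRange_one]
      simp
    have hp0get : ∀ i, i < ln.toNat → (PySem.List.pyRange 0 ln 1).getD i 0 = (i : Int) := by
      intro i hi
      rw [List.getD_eq_getElem _ _ (by rw [hp0len]; exact hi)]
      rw [PySem.List.getElem_pyRange_one]
      simp
    have hv0 : ValidP (PySem.List.pyRange 0 ln 1) := by
      intro i hi
      rw [hp0len] at hi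
      rw [hp0get i hi]
      refine ⟨by positivity, ?_⟩
      rw [hp0len]
      exact_mod_cast hi
    have hpar0 : ∀ i, i < ln.toNat → parF (PySem.List.pyRange 0 ln 1) i = i := by
      intro i hi
      unfold parF
      rw [hp0get i hi]
      simp
    have hm0 : MeasP (PySem.List.pyRange 0 ln 1) (fun _ => 0) := by
      intro i hi hni
      rw [hp0len] at hi
      exact absurd (hpar0 i hi) hni
    have hroot0 : ∀ i, i < ln.toNat → RootP (PySem.List.pyRange 0 ln 1) i = i :=
      fun i hi => Root_root (hpar0 i hi)
    have hRel0 : RelP (PySem.List.pyRange 0 ln 1) (PySem.List.pyRange 0 ln 1) ln.toNat := by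
      intro i j hi hj
      rw [hroot0 i hi, hroot0 j hj, hp0get i hi, hp0get j hj]
      exact ⟨fun h => by exact_mod_cast h, fun h => by exact_mod_cast h⟩
    obtain ⟨hF1, hF2, hF3, hF4, hF5⟩ := loop_inv (lf.zip lt) (PySem.List.pyRange 0 ln 1)
      (List.replicate ln.toNat 0) (PySem.List.pyRange 0 ln 1) hp0len hp0len hv0
      ⟨_, hm0⟩ hRel0 hedges
    set pF := ((lf.zip lt).foldl (fun st uv => unionA st.1 st.2 (uv.1 - 1) (uv.2 - 1))
      (PySem.List.pyRange 0 ln 1, List.replicate ln.toNat 0)).1 with hpF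
    set labF := ((lf.zip lt).foldl
      (fun lab uv =>
        let a := PySem.List.pyGetD lab (uv.1 - 1) 0
        let b := PySem.List.pyGetD lab (uv.2 - 1) 0
        if a ≠ b then lab.map (fun x => if x = b then a else x) else lab)
      (PySem.List.pyRange 0 ln 1)) with hlabF
    have hbounds : ∀ i ∈ PySem.List.pyRange 0 ln 1, 0 ≤ i ∧ i < (ln.toNat : Int) := by
      intro i hi
      rw [PySem.List.mem_pyRange_one] at hi
      omega
    have hfold := fold_finds (n := ln.toNat) (g := fun j => RootP pF j)
      (PySem.List.pyRange 0 ln 1) pF PySem.Set.empty hF1 hF3 hF4 hbounds (fun j _ => rfl)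
    rw [hfold]
    have hfoldr : (PySem.List.pyRange 0 ln 1).foldl
        (fun s i => PySem.Set.add s (((fun j => RootP pF j) i.toNat : Nat) : Int)) PySem.Set.empty
        = PySem.Set.ofList ((PySem.List.pyRange 0 ln 1).map (fun i => ((RootP pF i.toNat : Nat) : Int))) := by
      rw [← PySem.Set.update_map_eq_foldl_add]
      rfl
    rw [hfoldr]
    have hL1len : ((PySem.List.pyRange 0 ln 1).map
        (fun i => ((RootP pF i.toNat : Nat) : Int))).length = ln.toNat := by
      rw [List.length_map, hp0len]
    have hL1get : ∀ i, i < ln.toNat → ((PySem.List.pyRange 0 ln 1).map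
        (fun i => ((RootP pF i.toNat : Nat) : Int))).getD i 0 = ((RootP pF i : Nat) : Int) := by
      intro i hi
      rw [List.getD_eq_getElem _ _ (by rw [hL1len]; exact hi)]
      rw [List.getElem_map]
      rw [PySem.List.getElem_pyRange_one]
      simp
    have hcnt := count_eq (L1 := (PySem.List.pyRange 0 ln 1).map
        (fun i => ((RootP pF i.toNat : Nat) : Int))) (L2 := labF)
      (by rw [hL1len, hF2]) ?_
    · simp only [PySem.Set.len]
      rw [hcnt]
    · intro i j hi hj
      rw [hL1len] at hi hj
      rw [hL1get i hi, hL1get j hj]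
      have := hF5 i j hi hj
      constructor
      · intro h
        exact this.mp (by exact_mod_cast h)
      · intro h
        exact_mod_cast this.mpr h
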